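-- pv_equiv track=rewrite | github.com/Irreq/polyomino-contraction | algorithm.py | is_allowed_update
-- ===== SOURCE A (Python) =====
-- ALLOW_DIAGONAL_NEIGHBORS = True
--
-- def get_nearby(x: int, y: int, allow_diagonal=ALLOW_DIAGONAL_NEIGHBORS) -> tuple[tuple]:
--    """
--    Return a tuple of four tuples, where each inner tuple contains two integer values
--    representing the coordinates of a nearby point relative to the input point (x, y).
--
--    Parameters:
--    x (int): The x-coordinate of the input point.
--    y (int): The y-coordinate of the input point.
--
--    Returns:
--    tuple of tuples: A tuple containing four tuples, where each inner tuple contains two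
--    integer values representing the coordinates of a nearby point relative to the input point.
--    The nearby points are defined as:
--    - (x, y+1) which is one unit above the input point
--    - (x-1, y) which is one unit to the left of the input point
--    - (x+1, y) which is one unit to the right of the input point
--    - (x, y-1) which is one unit below the input point
--
--    Example:
--    >>> get_nearby(0, 0)
--    ((0, 1), (-1, 0), (1, 0), (0, -1))
--    """
--
--
--    if allow_diagonal:
--
--       return (
--          (x-1, y+1), (x, y+1), (x+1, y+1),
--          (x-1, y),              (x+1, y),
--          (x-1, y-1), (x, y-1), (x+1, y-1)
--       )
--
--    else:
--       return (
--                      (x, y+1),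
--          (x-1, y),             (x+1, y),
--                      (x, y-1),
--       )
--
-- def is_allowed_update(new_shape, original_relation):
--    for index, neighbors in original_relation.items():
--       if index not in new_shape:
--          return False
--
--       x, y = new_shape[index]
--       d = [possible for possible in get_nearby(x, y) if possible in new_shape.values()]
--       new_neighbors = [index for index, pos in new_shape.items() if pos in d]
--       for neighbor in neighbors:
--          if neighbor not in new_neighbors:
--             return False
--
--    return True
-- ===== SOURCE B (Python) =====
-- ALLOW_DIAGONAL_NEIGHBORS = True
--
-- def get_nearby(x: int, y: int, allow_diagonal=ALLOW_DIAGONAL_NEIGHBORS) -> tuple[tuple]: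
--     if allow_diagonal:
--         return (
--             (x-1, y+1), (x, y+1), (x+1, y+1),
--             (x-1, y),              (x+1, y),
--             (x-1, y-1), (x, y-1), (x+1, y-1)
--         )
--     else:
--         return (
--                         (x, y+1),
--             (x-1, y),             (x+1, y),
--                         (x, y-1),
--         )
--
-- def is_allowed_update(new_shape, original_relation):
--     # Index every position once: coordinate -> list of ALL node indices there.
--     at = {}
--     for idx, pos in new_shape.items():
--         at.setdefault(pos, []).append(idx)
--
--     def ok(index, neighbors):
--         pos = new_shape.get(index)
--         if pos is None:
--             return False
--         x, y = pos
--         adj = []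
--         for p in get_nearby(x, y):
--             adj.extend(at.get(p, []))
--         return all(n in adj for n in neighbors)
--
--     return all(ok(index, neighbors) for index, neighbors in original_relation.items())
-- ===== Notes on version B (the rewrite author's own statement) =====
-- stated objective: alternative
-- what changed: B builds a coordinate->indices dictionary in one pass and answers each node's adjacency by eight table lookups, instead of A's per-node rescan of all of new_shape (filtering values, then re-deriving new_neighbors from items).
import Mathlib
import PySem

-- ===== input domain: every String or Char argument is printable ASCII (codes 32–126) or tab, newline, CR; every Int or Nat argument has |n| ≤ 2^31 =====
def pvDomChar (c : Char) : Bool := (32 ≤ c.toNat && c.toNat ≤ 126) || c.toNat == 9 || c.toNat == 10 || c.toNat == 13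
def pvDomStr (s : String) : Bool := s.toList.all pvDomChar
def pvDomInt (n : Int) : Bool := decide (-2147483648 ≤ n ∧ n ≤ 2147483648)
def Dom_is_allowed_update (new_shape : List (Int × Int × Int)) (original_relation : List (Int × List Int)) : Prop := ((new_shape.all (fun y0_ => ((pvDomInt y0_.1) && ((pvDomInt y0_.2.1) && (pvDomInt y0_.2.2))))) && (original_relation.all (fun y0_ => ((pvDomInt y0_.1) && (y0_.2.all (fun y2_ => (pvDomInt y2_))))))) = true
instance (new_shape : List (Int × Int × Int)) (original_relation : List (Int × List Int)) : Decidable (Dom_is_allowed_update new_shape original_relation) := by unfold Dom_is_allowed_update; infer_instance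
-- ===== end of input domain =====

-- ===== PORT A =====
-- B changes: a prebuilt coordinate->indices dictionary replaces A's per-node rescan of new_shape (objective: alternative decomposition).
-- get_nearby with the module default ALLOW_DIAGONAL_NEIGHBORS = True (the only way A calls it)
def pvGetNearby (x y : Int) : List (Int × Int) :=
  [(x-1, y+1), (x, y+1), (x+1, y+1),
   (x-1, y),             (x+1, y),
   (x-1, y-1), (x, y-1), (x+1, y-1)]

-- the for-loop of A over original_relation.items(), with its early returns
def pvLoopA (ns : PySem.Dict Int (Int × Int)) : List (Int × List Int) → Bool
  | [] => true
  | (index, neighbors) :: rest =>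
    match ns.get? index with
    | none => false            -- "if index not in new_shape: return False"
    | some (x, y) =>
      let d := (pvGetNearby x y).filter (fun possible => ns.values.contains possible)
      let newNeighbors := (ns.items.filter (fun ip => d.contains ip.2)).map (fun ip => ip.1)
      if neighbors.all (fun neighbor => newNeighbors.contains neighbor) then pvLoopA ns rest
      else false               -- "if neighbor not in new_neighbors: return False"

def is_allowed_update (new_shape : List (Int × Int × Int)) (original_relation : List (Int × List Int)) : Bool :=
  pvLoopA (PySem.Dict.ofList new_shape) (PySem.Dict.ofList original_relation).items

-- ===== PORT B =====
-- "all(n in adj for n in neighbors)" after the position-index lookup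
def pvOkB (ns : PySem.Dict Int (Int × Int)) (at_ : PySem.Dict (Int × Int) (List Int))
    (index : Int) (neighbors : List Int) : Bool :=
  match ns.get? index with
  | none => false
  | some (x, y) =>
    let adj := (pvGetNearby x y).foldl (fun acc p => acc ++ at_.getD p []) []
    neighbors.all (fun n => adj.contains n)

def is_allowed_update_alt (new_shape : List (Int × Int × Int)) (original_relation : List (Int × List Int)) : Bool :=
  let ns := PySem.Dict.ofList new_shape
  let at_ := ns.items.foldl (fun d p => d.modify p.2 [] (fun l => l ++ [p.1])) PySem.Dict.empty
  (PySem.Dict.ofList original_relation).items.all (fun e => pvOkB ns at_ e.1 e.2)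

-- ===== PRECONDITION & SPEC =====
def Spec_is_allowed_update (new_shape : List (Int × Int × Int)) (original_relation : List (Int × List Int)) (out : Bool) : Prop := out = is_allowed_update_alt new_shape original_relation
instance (new_shape : List (Int × Int × Int)) (original_relation : List (Int × List Int)) (out : Bool) : Decidable (Spec_is_allowed_update new_shape original_relation out) := by unfold Spec_is_allowed_update; infer_instance

-- ===== CLAIM (what is proved, stated in full; the proofs are below) =====
def Claim_equal_is_allowed_update : Prop := ∀ (new_shape : List (Int × Int × Int)) (original_relation : List (Int × List Int)), Dom_is_allowed_update new_shape original_relation → Spec_is_allowed_update new_shape original_relation (is_allowed_update new_shape original_relation)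

-- ===== LEMMAS AND PROOFS =====

-- the position index built by B (same fold as the let-binding in is_allowed_update_alt)
def pvAt (ns : PySem.Dict Int (Int × Int)) : PySem.Dict (Int × Int) (List Int) :=
  ns.items.foldl (fun d p => d.modify p.2 [] (fun l => l ++ [p.1])) PySem.Dict.empty

theorem pvAt_getD (ns : PySem.Dict Int (Int × Int)) (c : Int × Int) :
    (pvAt ns).getD c [] = (ns.items.filter (fun ip => ip.2 == c)).map (fun ip => ip.1) := by
  have h : pvAt ns = (ns.items.map Prod.swap).foldl
      (fun d p => d.modify p.1 [] (fun l => l ++ [p.2])) PySem.Dict.empty := by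
    simp [pvAt, List.foldl_map, Prod.swap]
  rw [h, PySem.Dict.getD_foldl_modify_append]
  simp [List.filter_map, List.map_map, Function.comp_def, Prod.swap]

theorem pv_mem_newNeighbors (ns : PySem.Dict Int (Int × Int)) (x y n : Int) :
    (n ∈ (ns.items.filter (fun ip =>
        ((pvGetNearby x y).filter (fun possible => ns.values.contains possible)).contains ip.2)).map
        (fun ip => ip.1))
    ↔ ∃ p, (n, p) ∈ ns.items ∧ p ∈ pvGetNearby x y := by
  simp only [List.mem_map, List.mem_filter, List.elem_eq_contains.symm, List.elem_iff]
  constructor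
  · rintro ⟨⟨i, p⟩, ⟨hmem, hp, -⟩, rfl⟩
    exact ⟨p, hmem, hp⟩
  · rintro ⟨p, hmem, hp⟩
    refine ⟨(n, p), ⟨hmem, hp, ?_⟩, rfl⟩
    simp only [PySem.Dict.values, List.mem_map]
    exact ⟨(n, p), hmem, rfl⟩

theorem pv_mem_adj (ns : PySem.Dict Int (Int × Int)) (x y n : Int) :
    (n ∈ (pvGetNearby x y).foldl (fun acc p => acc ++ (pvAt ns).getD p []) [])
    ↔ ∃ p, (n, p) ∈ ns.items ∧ p ∈ pvGetNearby x y := by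
  rw [PySem.List.foldl_append_eq_flatMap]
  simp only [List.nil_append, List.mem_flatMap, pvAt_getD, List.mem_map, List.mem_filter,
    beq_iff_eq]
  constructor
  · rintro ⟨p, hp, ⟨i, q⟩, ⟨hmem, rfl⟩, rfl⟩
    exact ⟨q, hmem, hp⟩
  · rintro ⟨p, hmem, hp⟩
    exact ⟨p, hp, (n, p), ⟨hmem, rfl⟩, rfl⟩

theorem pv_all_congr (l : List Int) (p q : Int → Bool) (h : ∀ x, p x = q x) :
    l.all p = l.all q := by
  induction l with
  | nil => rfl
  | cons a t ih => simp_all [List.all_cons]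

theorem pvLoopA_eq_all (ns : PySem.Dict Int (Int × Int)) (l : List (Int × List Int)) :
    pvLoopA ns l = l.all (fun e => pvOkB ns (pvAt ns) e.1 e.2) := by
  induction l with
  | nil => rfl
  | cons e rest ih =>
    obtain ⟨index, neighbors⟩ := e
    rw [List.all_cons]
    cases hg : ns.get? index with
    | none => simp [pvLoopA, pvOkB, hg]
    | some xy =>
      obtain ⟨x, y⟩ := xy
      have hhead : (neighbors.all (fun neighbor =>
          ((ns.items.filter (fun ip =>
            ((pvGetNearby x y).filter (fun possible => ns.values.contains possible)).contains ip.2)).map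
            (fun ip => ip.1)).contains neighbor))
          = pvOkB ns (pvAt ns) index neighbors := by
        simp only [pvOkB, hg]
        refine pv_all_congr _ _ _ (fun n => ?_)
        have h := (pv_mem_newNeighbors ns x y n).trans (pv_mem_adj ns x y n).symm
        apply Bool.eq_iff_iff.mpr
        simp only [List.contains_iff_mem]
        exact h
      simp only [pvLoopA, hg, ← hhead]
      split
      · next h => rw [h, ih]; simp
      · next h =>
        rw [Bool.not_eq_true] at h
        rw [h, Bool.false_and]

-- ===== VERDICT (by name: the statement is the Claim_ definition above) =====
theorem is_allowed_update_spec : Claim_equal_is_allowed_update := by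
  intro new_shape original_relation _
  unfold Spec_is_allowed_update is_allowed_update is_allowed_update_alt
  exact pvLoopA_eq_all _ _
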